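-- pv_equiv track=rewrite | github.com/00-mikazuki/kuliah-alpro | Program/python/Modul 8 - 2.2 Maks List 2D.py | maxList2D
-- ===== SOURCE A (Python) =====
-- def maxList2D(data,jenisMax):
--     listMax=[]
--     if jenisMax=='kolom':
--         for i in range(len(data)):
--             compare=0
--             for j in range(len(data[0])):
--                 if data[i][j]>compare:
--                     compare=data[i][j]
--             listMax.append(compare)
--     elif jenisMax=='baris':
--         for j in range(len(data[0])):
--             compare=0
--             for i in range(len(data)):
--                 if data[i][j]>compare:
--                     compare=data[i][j]
--             listMax.append(compare)
--     return listMax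
-- ===== SOURCE B (Python) =====
-- def maxList2D(data, jenisMax):
--     if jenisMax == 'kolom':
--         # per-row maximum via sort: last element of the 0-padded, ascending-sorted row
--         return [sorted([0] + row)[-1] for row in data]
--     if jenisMax == 'baris':
--         # single row-major pass: running column-maxima accumulator, no column-indexed scan
--         acc = [0] * len(data[0])
--         for row in data:
--             acc = [v if v > a else a for a, v in zip(acc, row)]
--         return acc
--     return []
-- ===== Notes on version B (the rewrite author's own statement) =====
-- stated objective: alternative
-- what changed: B computes each row maximum by sorting the 0-padded row and taking its last element, and computes column maxima in one row-major pass that folds each row into a running accumulator list, instead of A's column-indexed nested loops.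
-- outside the precondition, e.g. on maxList2D([[1], [2, 3]], 'kolom'): A returns [1, 2], B returns [1, 3]
import Mathlib
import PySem

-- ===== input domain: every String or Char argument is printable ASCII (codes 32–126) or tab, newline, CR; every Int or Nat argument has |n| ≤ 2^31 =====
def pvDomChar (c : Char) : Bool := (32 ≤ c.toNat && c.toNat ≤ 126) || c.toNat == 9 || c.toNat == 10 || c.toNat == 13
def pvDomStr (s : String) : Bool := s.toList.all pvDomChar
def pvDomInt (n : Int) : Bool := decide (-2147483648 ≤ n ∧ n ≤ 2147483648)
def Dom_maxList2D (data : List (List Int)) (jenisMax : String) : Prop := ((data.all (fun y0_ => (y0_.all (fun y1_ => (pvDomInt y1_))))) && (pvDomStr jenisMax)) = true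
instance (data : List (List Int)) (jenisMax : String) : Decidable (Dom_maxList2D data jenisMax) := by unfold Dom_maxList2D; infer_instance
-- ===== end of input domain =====

-- B (alternative): row maxima via sort-and-take-last of the 0-padded row; column maxima in one
-- row-major pass folding each row into a running accumulator list, instead of A's indexed scans.

-- ===== PORT A =====
def maxList2D (data : List (List Int)) (jenisMax : String) : List Int :=
  if jenisMax = "kolom" then
    (PySem.List.pyRange 0 (PySem.List.len data) 1).foldl
      (fun listMax i =>
        listMax ++ [(PySem.List.pyRange 0 (PySem.List.len (PySem.List.pyGetD data 0 [])) 1).foldl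
          (fun compare j =>
            if PySem.List.pyGetD (PySem.List.pyGetD data i []) j 0 > compare then
              PySem.List.pyGetD (PySem.List.pyGetD data i []) j 0
            else compare) 0]) []
  else if jenisMax = "baris" then
    (PySem.List.pyRange 0 (PySem.List.len (PySem.List.pyGetD data 0 [])) 1).foldl
      (fun listMax j =>
        listMax ++ [(PySem.List.pyRange 0 (PySem.List.len data) 1).foldl
          (fun compare i =>
            if PySem.List.pyGetD (PySem.List.pyGetD data i []) j 0 > compare then
              PySem.List.pyGetD (PySem.List.pyGetD data i []) j 0
            else compare) 0]) []
  else []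

-- ===== PORT B =====
-- sorted([0] + row)[-1] of Source B (the list is nonempty, so the -1 index is exact)
def rowTop (row : List Int) : Int :=
  PySem.List.pyGetD (PySem.List.sorted (0 :: row) (fun x => x) false) (-1) 0

-- acc = [v if v > a else a for a, v in zip(acc, row)] of Source B
def stepMax (acc row : List Int) : List Int :=
  (acc.zip row).map (fun p => if p.2 > p.1 then p.2 else p.1)

def maxList2D_alt (data : List (List Int)) (jenisMax : String) : List Int :=
  if jenisMax = "kolom" then data.map rowTop
  else if jenisMax = "baris" then
    -- acc = [0] * len(data[0]); data[0] is exact under Pre_ (data ≠ [] in the 'baris' branch)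
    data.foldl stepMax (List.replicate (PySem.List.pyGetD data 0 []).length 0)
  else []

-- ===== PRECONDITION & SPEC =====
-- Pre_ excludes ragged matrices on which A raises IndexError (a row shorter than row 0) or, in the
-- 'kolom' branch, silently truncates longer rows to len(data[0]) — an artefact of A's indexing —
-- and empty data in the 'baris' branch, where A raises IndexError on data[0].
def Pre_maxList2D (data : List (List Int)) (jenisMax : String) : Prop :=
  (jenisMax = "kolom" → ∀ row ∈ data, row.length = (data.headD []).length) ∧
  (jenisMax = "baris" → data ≠ [] ∧ ∀ row ∈ data, (data.headD []).length ≤ row.length)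
instance (data : List (List Int)) (jenisMax : String) : Decidable (Pre_maxList2D data jenisMax) := by unfold Pre_maxList2D; infer_instance
def pvWitness_maxList2D : List (List Int) × String := ([[1, 2], [3, 4]], "kolom")

def Spec_maxList2D (data : List (List Int)) (jenisMax : String) (out : List Int) : Prop := out = maxList2D_alt data jenisMax
instance (data : List (List Int)) (jenisMax : String) (out : List Int) : Decidable (Spec_maxList2D data jenisMax out) := by unfold Spec_maxList2D; infer_instance

-- ===== CLAIM (what is proved, stated in full; the proofs are below) =====
def Claim_equal_maxList2D : Prop := ∀ (data : List (List Int)) (jenisMax : String), Dom_maxList2D data jenisMax → Pre_maxList2D data jenisMax → Spec_maxList2D data jenisMax (maxList2D data jenisMax)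

-- ===== LEMMAS AND PROOFS =====

lemma ite_gt_eq_max (c v : Int) : (if v > c then v else c) = max c v := by
  rcases lt_or_ge c v with h | h
  · rw [if_pos h, max_eq_right h.le]
  · rw [if_neg (by omega), max_eq_left h]

lemma foldl_ite_eq_foldl_max (l : List Int) (a : Int) :
    l.foldl (fun compare v => if v > compare then v else compare) a = l.foldl max a := by
  induction l generalizing a with
  | nil => rfl
  | cons x t ih => simp only [List.foldl_cons, ite_gt_eq_max]

lemma le_foldl_max_self (l : List Int) (a : Int) : a ≤ l.foldl max a := by
  induction l generalizing a with
  | nil => exact le_refl a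
  | cons x t ih => exact le_trans (le_max_left a x) (ih _)

lemma mem_le_foldl_max (l : List Int) (a y : Int) (hy : y ∈ l) : y ≤ l.foldl max a := by
  induction l generalizing a with
  | nil => cases hy
  | cons x t ih =>
    rcases List.mem_cons.mp hy with rfl | hy'
    · exact le_trans (le_max_right a y) (le_foldl_max_self t _)
    · exact ih _ hy'

lemma foldl_max_le (l : List Int) (a b : Int) (ha : a ≤ b) (h : ∀ y ∈ l, y ≤ b) :
    l.foldl max a ≤ b := by
  induction l generalizing a with
  | nil => exact ha
  | cons x t ih =>
    exact ih _ (max_le ha (h x (List.mem_cons_self ..))) (fun y hy => h y (List.mem_cons_of_mem _ hy))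

lemma pairwise_le_getLast : ∀ (l : List Int), l.Pairwise (· ≤ ·) → ∀ (hne : l ≠ []) (x : Int), x ∈ l → x ≤ l.getLast hne := by
  intro l
  induction l with
  | nil => intro _ hne; exact absurd rfl hne
  | cons a t ih =>
    intro h hne x hx
    cases t with
    | nil =>
      simp only [List.mem_singleton] at hx
      subst hx; rfl
    | cons b u =>
      have h' := List.pairwise_cons.mp h
      have hbu : (b :: u).getLast (by simp) = (a :: b :: u).getLast hne :=
        (List.getLast_cons (by simp)).symm
      rcases List.mem_cons.mp hx with rfl | hx'
      · have hab : x ≤ b := h'.1 b (List.mem_cons_self ..)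
        exact hbu ▸ le_trans hab (ih h'.2 (by simp) b (List.mem_cons_self ..))
      · exact hbu ▸ ih h'.2 (by simp) x hx'

lemma rowTop_eq_foldl (row : List Int) :
    rowTop row = row.foldl (fun compare v => if v > compare then v else compare) 0 := by
  rw [foldl_ite_eq_foldl_max]
  unfold rowTop
  have hperm := PySem.List.sorted_perm (0 :: row) (fun x => x) false
  have hne : PySem.List.sorted (0 :: row) (fun x => x) false ≠ [] := by
    intro hc
    have := hperm.length_eq
    simp [hc] at this
  rw [PySem.List.pyGetD_neg_one _ _ hne]
  have hpw : (PySem.List.sorted (0 :: row) (fun x => x) false).Pairwise (· ≤ ·) := by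
    have := PySem.List.sorted_pairwise (xs := 0 :: row) (key := fun x => x)
    simpa using this
  have hlastmem : (PySem.List.sorted (0 :: row) (fun x => x) false).getLast hne ∈ 0 :: row :=
    hperm.mem_iff.mp (List.getLast_mem hne)
  apply le_antisymm
  · rcases List.mem_cons.mp hlastmem with h0 | hmem
    · rw [h0]; exact le_foldl_max_self row 0
    · exact mem_le_foldl_max row 0 _ hmem
  · apply foldl_max_le
    · exact pairwise_le_getLast _ hpw hne 0
        (hperm.mem_iff.mpr (List.mem_cons_self ..))
    · intro y hy
      exact pairwise_le_getLast _ hpw hne y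
        (hperm.mem_iff.mpr (List.mem_cons_of_mem _ hy))

lemma getD_map_range' (f : Nat → Int) (n j : Nat) (h : j < n) :
    ((List.range n).map f).getD j 0 = f j := by
  rw [List.getD_eq_getElem?_getD, List.getElem?_map, List.getElem?_range h]
  rfl

lemma stepMax_eq_map_range (acc row : List Int) (h : acc.length ≤ row.length) :
    stepMax acc row = (List.range acc.length).map
      (fun j => if row.getD j 0 > acc.getD j 0 then row.getD j 0 else acc.getD j 0) := by
  induction acc generalizing row with
  | nil => rfl
  | cons a t ih =>
    cases row with
    | nil => simp at h
    | cons v rv =>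
      show (if v > a then v else a) :: stepMax t rv = _
      simp only [List.length_cons]
      rw [List.range_succ_eq_map, List.map_cons, List.map_map]
      congr 1
      rw [ih rv (by simpa using h)]
      apply List.map_congr_left
      intro j _
      simp

lemma foldl_stepMax_eq (rows : List (List Int)) :
    ∀ (acc : List Int), (∀ r ∈ rows, acc.length ≤ r.length) →
    rows.foldl stepMax acc = (List.range acc.length).map
      (fun j => rows.foldl (fun c row => if row.getD j 0 > c then row.getD j 0 else c)
        (acc.getD j 0)) := by
  induction rows with
  | nil =>
    intro acc _
    apply List.ext_getElem
    · simp
    · intro i h1 h2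
      have h1' : i < acc.length := by simpa using h1
      simp [List.getD_eq_getElem?_getD, List.getElem?_eq_getElem h1']
  | cons r rs ih =>
    intro acc hlen
    have hr : acc.length ≤ r.length := hlen r (List.mem_cons_self ..)
    have hstep := stepMax_eq_map_range acc r hr
    have hsteplen : (stepMax acc r).length = acc.length := by
      rw [hstep]; simp
    rw [List.foldl_cons, ih (stepMax acc r)
      (fun r' hr' => hsteplen ▸ hlen r' (List.mem_cons_of_mem _ hr')), hsteplen]
    simp only [List.foldl_cons]
    apply List.map_congr_left
    intro j hj
    have hjn : j < acc.length := List.mem_range.mp hj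
    congr 1
    rw [hstep, getD_map_range' _ _ _ hjn]

-- ===== VERDICT (by name: the statement is the Claim_ definition above) =====
theorem maxList2D_spec : Claim_equal_maxList2D := by
  intro data jenisMax _ hpre
  unfold Pre_maxList2D at hpre
  show maxList2D data jenisMax = maxList2D_alt data jenisMax
  unfold maxList2D maxList2D_alt
  by_cases hk : jenisMax = "kolom"
  · rw [if_pos hk, if_pos hk]
    have hA : (PySem.List.pyRange 0 (PySem.List.len data) 1).foldl
        (fun listMax i =>
          listMax ++ [(PySem.List.pyRange 0 (PySem.List.len (PySem.List.pyGetD data 0 [])) 1).foldl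
            (fun compare j =>
              if PySem.List.pyGetD (PySem.List.pyGetD data i []) j 0 > compare then
                PySem.List.pyGetD (PySem.List.pyGetD data i []) j 0
              else compare) 0]) []
        = data.foldl
            (fun listMax row =>
              listMax ++ [(PySem.List.pyRange 0 (PySem.List.len (PySem.List.pyGetD data 0 [])) 1).foldl
                (fun compare j =>
                  if PySem.List.pyGetD row j 0 > compare then PySem.List.pyGetD row j 0
                  else compare) 0]) [] :=
      PySem.List.foldl_pyRange_zero_pyGetD data []
        (fun listMax row =>
          listMax ++ [(PySem.List.pyRange 0 (PySem.List.len (PySem.List.pyGetD data 0 [])) 1).foldl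
            (fun compare j =>
              if PySem.List.pyGetD row j 0 > compare then PySem.List.pyGetD row j 0
              else compare) 0]) []
    rw [hA, PySem.List.foldl_append_singleton_eq_map, List.nil_append]
    apply List.map_congr_left
    intro row hrow
    have hr := (hpre.1 hk) row hrow
    have hlen0 : PySem.List.len (PySem.List.pyGetD data 0 []) = PySem.List.len row := by
      rw [PySem.List.pyGetD_zero]
      cases data with
      | nil => cases hrow
      | cons r rs => simp [PySem.List.len_eq, hr]
    rw [hlen0]
    have hinner : (PySem.List.pyRange 0 (PySem.List.len row) 1).foldl
        (fun compare j =>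
          if PySem.List.pyGetD row j 0 > compare then PySem.List.pyGetD row j 0 else compare) 0
        = row.foldl (fun compare v => if v > compare then v else compare) 0 :=
      PySem.List.foldl_pyRange_zero_pyGetD row 0
        (fun compare v => if v > compare then v else compare) 0
    rw [hinner, rowTop_eq_foldl]
  · by_cases hb : jenisMax = "baris"
    · rw [if_neg hk, if_neg hk, if_pos hb, if_pos hb]
      obtain ⟨hne, hge⟩ := hpre.2 hb
      have hhead : PySem.List.pyGetD data 0 [] = data.headD [] := by
        rw [PySem.List.pyGetD_zero]
        cases data with
        | nil => exact absurd rfl hne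
        | cons r rs => rfl
      have hlen0 : PySem.List.len (PySem.List.pyGetD data 0 []) = ((data.headD []).length : Int) := by
        rw [hhead, PySem.List.len_eq]
      rw [hlen0, hhead, PySem.List.foldl_append_singleton_eq_map, List.nil_append,
        PySem.List.pyRange_zero_nat, List.map_map]
      rw [foldl_stepMax_eq data (List.replicate (data.headD []).length 0)
        (by intro r hr; rw [List.length_replicate]; exact hge r hr), List.length_replicate]
      apply List.map_congr_left
      intro k hk'
      simp only [Function.comp_apply]
      have hcol : (PySem.List.pyRange 0 (PySem.List.len data) 1).foldl
          (fun compare i =>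
            if PySem.List.pyGetD (PySem.List.pyGetD data i []) (↑k) 0 > compare then
              PySem.List.pyGetD (PySem.List.pyGetD data i []) (↑k) 0
            else compare) 0
          = data.foldl
              (fun compare row =>
                if PySem.List.pyGetD row (↑k) 0 > compare then PySem.List.pyGetD row (↑k) 0
                else compare) 0 :=
        PySem.List.foldl_pyRange_zero_pyGetD data []
          (fun compare row =>
            if PySem.List.pyGetD row (↑k) 0 > compare then PySem.List.pyGetD row (↑k) 0
            else compare) 0
      rw [hcol]
      simp only [PySem.List.pyGetD_natCast]
      have hk'' : k < (data.headD []).length := List.mem_range.mp hk'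
      rw [List.getD_replicate _ hk'']
    · rw [if_neg hk, if_neg hk, if_neg hb, if_neg hb]
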